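-- pv_equiv track=rewrite | github.com/fan-ziqi/rl_sar | src/rl_sar/scripts/rl_sdk.py | ReadVectorFromYaml
-- ===== SOURCE A (Python) =====
-- def ReadVectorFromYaml(values, framework, rows, cols):
--     if framework == "isaacsim":
--         transposed_values = [0] * cols * rows
--         for r in range(rows):
--             for c in range(cols):
--                 transposed_values[c * rows + r] = values[r * cols + c]
--         return transposed_values
--     elif framework == "isaacgym":
--         return values
--     else:
--         raise ValueError(f"Unsupported framework: {framework}")
-- ===== SOURCE B (Python) =====
-- def ReadVectorFromYaml(values, framework, rows, cols):
--     if framework == "isaacsim":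
--         result = []
--         for c in range(cols):
--             result += values[c::cols]
--         return result
--     elif framework == "isaacgym":
--         return values
--     else:
--         raise ValueError(f"Unsupported framework: {framework}")
-- ===== Notes on version B (the rewrite author's own statement) =====
-- stated objective: simpler
-- what changed: The isaacsim branch no longer preallocates a rows*cols buffer and scatter-writes transposed[c*rows+r]=values[r*cols+c] in a nested loop; it concatenates the strided column slices values[c::cols], one slice per column.
-- outside the precondition, e.g. on ReadVectorFromYaml([1, 2, 3], 'isaacsim', 1, 2): A returns [1, 2], B returns [1, 3, 2]; on ReadVectorFromYaml([1], 'isaacsim', -1, 1): A returns [], B returns [1]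
import Mathlib
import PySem

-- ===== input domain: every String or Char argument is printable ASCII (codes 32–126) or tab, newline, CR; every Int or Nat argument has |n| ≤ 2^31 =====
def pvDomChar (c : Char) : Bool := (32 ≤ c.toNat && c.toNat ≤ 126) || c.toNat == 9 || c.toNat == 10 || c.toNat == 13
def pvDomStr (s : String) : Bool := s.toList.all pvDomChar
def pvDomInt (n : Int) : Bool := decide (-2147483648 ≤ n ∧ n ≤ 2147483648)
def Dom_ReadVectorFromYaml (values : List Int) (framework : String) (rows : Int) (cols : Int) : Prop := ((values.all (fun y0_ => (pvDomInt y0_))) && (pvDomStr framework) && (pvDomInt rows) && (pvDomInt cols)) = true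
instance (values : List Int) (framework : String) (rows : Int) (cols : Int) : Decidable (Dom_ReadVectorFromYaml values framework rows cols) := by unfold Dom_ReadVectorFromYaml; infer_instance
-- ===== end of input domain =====

-- B replaces A's preallocated buffer filled by nested scatter-writes with simple
-- concatenation of the strided column slices values[c::cols] (objective: simpler).


-- ===== PORT A =====
def ReadVectorFromYaml (values : List Int) (framework : String) (rows : Int) (cols : Int) : List Int :=
  if framework == "isaacsim" then
    -- transposed_values = [0] * cols * rows  (list repetition; empty for non-positive counts)
    let init : List Int := (List.replicate rows.toNat (List.replicate cols.toNat (0 : Int))).flatten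
    (PySem.List.pyRange 0 rows 1).foldl (fun tv r =>
      (PySem.List.pyRange 0 cols 1).foldl (fun tv c =>
        PySem.List.pySetD tv (c * rows + r) (PySem.List.pyGetD values (r * cols + c) 0)) tv) init
  else if framework == "isaacgym" then values
  else []  -- Python raises ValueError here; Pre_ excludes these inputs

-- ===== PORT B =====
def ReadVectorFromYaml_alt (values : List Int) (framework : String) (rows : Int) (cols : Int) : List Int :=
  if framework == "isaacsim" then
    (PySem.List.pyRange 0 cols 1).foldl (fun result c =>
      result ++ (PySem.List.slice? values (some c) none cols).getD []) []
  else if framework == "isaacgym" then values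
  else []  -- Python raises ValueError here; Pre_ excludes these inputs

-- ===== PRECONDITION & SPEC =====
-- Pre_ excludes unsupported frameworks (A raises ValueError), isaacsim inputs shorter than
-- rows*cols (A raises IndexError), and isaacsim inputs with cols > 0 whose length differs from
-- rows*cols or whose rows is negative: malformed shapes on which neither output is specified
-- and A's value (an empty or truncated list) and B's are both accidents of traversal order.
def Pre_ReadVectorFromYaml (values : List Int) (framework : String) (rows : Int) (cols : Int) : Prop :=
  framework = "isaacgym" ∨
    (framework = "isaacsim" ∧
      (cols ≤ 0 ∨ (0 ≤ rows ∧ 0 ≤ cols ∧ (values.length : Int) = rows * cols)))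
instance (values : List Int) (framework : String) (rows : Int) (cols : Int) : Decidable (Pre_ReadVectorFromYaml values framework rows cols) := by unfold Pre_ReadVectorFromYaml; infer_instance
def pvWitness_ReadVectorFromYaml : List Int × String × Int × Int := ([1, 2, 3, 4, 5, 6], "isaacsim", 2, 3)

def Spec_ReadVectorFromYaml (values : List Int) (framework : String) (rows : Int) (cols : Int) (out : List Int) : Prop := out = ReadVectorFromYaml_alt values framework rows cols
instance (values : List Int) (framework : String) (rows : Int) (cols : Int) (out : List Int) : Decidable (Spec_ReadVectorFromYaml values framework rows cols out) := by unfold Spec_ReadVectorFromYaml; infer_instance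

-- ===== CLAIM (what is proved, stated in full; the proofs are below) =====
def Claim_equal_ReadVectorFromYaml : Prop := ∀ (values : List Int) (framework : String) (rows : Int) (cols : Int), Dom_ReadVectorFromYaml values framework rows cols → Pre_ReadVectorFromYaml values framework rows cols → Spec_ReadVectorFromYaml values framework rows cols (ReadVectorFromYaml values framework rows cols)

-- ===== LEMMAS AND PROOFS =====

-- value of the transpose at flat (column-major) position j
def pvW (values : List Int) (rows cols : ℕ) (j : ℕ) : Int :=
  values.getD ((j % rows) * cols + j / rows) 0

theorem pvW_at (values : List Int) (rows cols r c : ℕ) (hr : r < rows) :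
    pvW values rows cols (c * rows + r) = values.getD (r * cols + c) 0 := by
  unfold pvW
  rw [Nat.mul_comm c rows, Nat.mul_add_mod, Nat.mod_eq_of_lt hr,
      Nat.mul_add_div (Nat.pos_of_ne_zero (by omega)), Nat.div_eq_of_lt hr, Nat.add_zero]

theorem pvFilterMap_eq_map {α β : Type} (l : List α) (f : α → Option β) (g : α → β)
    (h : ∀ x ∈ l, f x = some (g x)) : l.filterMap f = l.map g := by
  induction l with
  | nil => rfl
  | cons x xs ih =>
      simp only [List.filterMap_cons, h x (by simp), List.map_cons]
      exact congrArg _ (ih fun y hy => h y (by simp [hy]))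

-- values[c::cols] is the c-th column of the row-major rows×cols matrix
theorem pvSliceCol (values : List Int) (rows cols c : ℕ) (hc : c < cols)
    (hlen : values.length = rows * cols) :
    (PySem.List.slice? values (some (c : Int)) none (cols : Int)).getD [] =
      (List.range rows).map (fun r => values.getD (r * cols + c) 0) := by
  have h1 : ¬ ((cols : Int) = 0) := by omega
  have h2 : ¬ ((cols : Int) < 0) := by omega
  have h3 : ¬ ((c : Int) < 0) := by omega
  rcases Nat.eq_zero_or_pos rows with hr | hr
  · subst hr
    have hv : values = [] := List.eq_nil_of_length_eq_zero (by simpa using hlen)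
    subst hv
    simp only [PySem.List.slice?, PySem.List.sliceIndices, if_neg h1, if_neg h2, if_neg h3]
    simp
  · have hclen : c < values.length := by
      have : cols ≤ rows * cols := Nat.le_mul_of_pos_left cols hr
      omega
    have hmin : min (c : Int) (values.length : Int) = (c : Int) := by omega
    have h4 : (0 : Int) < (cols : Int) := by omega
    have h5 : (c : Int) < (values.length : Int) := by omega
    simp only [PySem.List.slice?, PySem.List.sliceIndices, if_neg h1, if_neg h2, if_neg h3,
      hmin, if_pos h4, if_pos h5]
    have hcount : ((values.length : Int) - c + cols - 1) / cols = (rows : Int) := by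
      have he : ((values.length : Int) - c + cols - 1) = ((cols - 1 - c : ℕ) : Int) + rows * cols := by
        omega
      rw [he, Int.add_mul_ediv_right _ _ h1, Int.ediv_eq_zero_of_lt (by omega) (by omega), zero_add]
    rw [hcount, Int.toNat_natCast, Option.getD_some]
    apply pvFilterMap_eq_map
    intro x hx
    have hxr : x < rows := List.mem_range.mp hx
    have hidx : ((c : Int) + cols * x) = ((x * cols + c : ℕ) : Int) := by push_cast; ring
    have hlt : x * cols + c < values.length := by
      have h6 : (x + 1) * cols ≤ rows * cols := Nat.mul_le_mul_right cols (by omega)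
      have h7 : (x + 1) * cols = x * cols + cols := by ring
      omega
    rw [hidx, Int.toNat_natCast, List.getElem?_eq_getElem hlt, List.getD_eq_getElem values 0 hlt]

-- concatenating the n-blocks indexed by range m flattens to range (m*n)
theorem pvRangeMul (m n : ℕ) (f : ℕ → Int) :
    (List.range m).flatMap (fun c => (List.range n).map (fun r => f (c * n + r))) =
      (List.range (m * n)).map f := by
  induction m with
  | zero => simp
  | succ m ih =>
      rw [List.range_succ, List.flatMap_append, ih, Nat.succ_mul, List.range_add, List.map_append]
      simp [List.map_map, Function.comp]

theorem pvFlattenRep (m n : ℕ) :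
    (List.replicate m (List.replicate n (0 : Int))).flatten = List.replicate (m * n) 0 := by
  induction m with
  | zero => simp
  | succ m ih => rw [List.replicate_succ, List.flatten_cons, ih, Nat.succ_mul, Nat.add_comm,
      ← List.replicate_add]

-- B on "isaacsim" with the exact shape is the column-major transpose
theorem pvB_char (values : List Int) (rows cols : ℕ) (hlen : values.length = rows * cols) :
    ReadVectorFromYaml_alt values "isaacsim" (rows : Int) (cols : Int) =
      (List.range (cols * rows)).map (pvW values rows cols) := by
  simp only [ReadVectorFromYaml_alt]
  rw [if_pos (show (("isaacsim" : String) == "isaacsim") = true from rfl)]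
  rw [PySem.List.pyRange_zero_natCast, List.foldl_map,
      PySem.List.foldl_append_eq_flatMap, List.nil_append]
  rw [List.flatMap_congr (fun c hc =>
        pvSliceCol values rows cols c (List.mem_range.mp hc) hlen)]
  rw [List.flatMap_congr (fun c _ =>
        (List.map_congr_left (fun r hr =>
          (pvW_at values rows cols r c (List.mem_range.mp hr)).symm)))]
  exact pvRangeMul cols rows (pvW values rows cols)

-- one scatter-write step of A, over (r, c) pairs
def pvStep (values : List Int) (rows cols : ℕ) (tv : List Int) (p : ℕ × ℕ) : List Int :=
  tv.set (p.2 * rows + p.1) (values.getD (p.1 * cols + p.2) 0)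

theorem pvFold_length (values : List Int) (rows cols : ℕ) :
    ∀ (ps : List (ℕ × ℕ)) (tv : List Int),
      (ps.foldl (pvStep values rows cols) tv).length = tv.length := by
  intro ps
  induction ps with
  | nil => intro tv; rfl
  | cons q ps ih => intro tv; rw [List.foldl_cons, ih]; simp [pvStep]

theorem pvFold_miss (values : List Int) (rows cols : ℕ) :
    ∀ (ps : List (ℕ × ℕ)) (tv : List Int) (j : ℕ),
      (∀ p ∈ ps, p.2 * rows + p.1 ≠ j) →
      (ps.foldl (pvStep values rows cols) tv)[j]? = tv[j]? := by
  intro ps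
  induction ps with
  | nil => intro tv j _; rfl
  | cons q ps ih =>
      intro tv j h
      rw [List.foldl_cons, ih _ _ (fun p hp => h p (by simp [hp]))]
      simp only [pvStep, List.getElem?_set]
      rw [if_neg (h q (by simp))]

theorem pvFold_hit (values : List Int) (rows cols : ℕ) :
    ∀ (ps : List (ℕ × ℕ)) (tv : List Int) (j : ℕ),
      (∀ p ∈ ps, p.1 < rows) → j < tv.length →
      (∃ p ∈ ps, p.2 * rows + p.1 = j) →
      (ps.foldl (pvStep values rows cols) tv)[j]? = some (pvW values rows cols j) := by
  intro ps
  induction ps with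
  | nil => intro tv j _ _ hex; simp at hex
  | cons q ps ih =>
      intro tv j hlt hj hex
      rw [List.foldl_cons]
      by_cases h : ∃ p ∈ ps, p.2 * rows + p.1 = j
      · exact ih _ j (fun p hp => hlt p (by simp [hp])) (by simpa [pvStep] using hj) h
      · have hq : q.2 * rows + q.1 = j := by
          rcases hex with ⟨p, hp, hpj⟩
          rcases List.mem_cons.mp hp with rfl | hp'
          · exact hpj
          · exact absurd ⟨p, hp', hpj⟩ h
        rw [pvFold_miss values rows cols ps _ j (by push Not at h; exact fun p hp => h p hp)]
        simp only [pvStep, List.getElem?_set]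
        rw [if_pos hq, if_pos (hq ▸ hj)]
        rw [← hq, pvW_at values rows cols q.1 q.2 (hlt q (by simp))]

-- A on "isaacsim" with the exact shape is the same column-major transpose
theorem pvA_char (values : List Int) (rows cols : ℕ) (hlen : values.length = rows * cols) :
    ReadVectorFromYaml values "isaacsim" (rows : Int) (cols : Int) =
      (List.range (cols * rows)).map (pvW values rows cols) := by
  simp only [ReadVectorFromYaml]
  rw [if_pos (show (("isaacsim" : String) == "isaacsim") = true from rfl)]
  rw [Int.toNat_natCast, Int.toNat_natCast, pvFlattenRep rows cols,
      PySem.List.pyRange_zero_natCast, PySem.List.pyRange_zero_natCast,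
      List.foldl_map]
  simp only [List.foldl_map, ← Nat.cast_mul, ← Nat.cast_add,
    PySem.List.pySetD_natCast, PySem.List.pyGetD_natCast]
  have hbody : ∀ (tv : List Int) (r c : ℕ),
      tv.set (c * rows + r) (values.getD (r * cols + c) 0) = pvStep values rows cols tv (r, c) := by
    intro tv r c; rfl
  simp only [hbody]
  have hflat : (List.range rows).foldl
      (fun tv r => (List.range cols).foldl (fun tv c => pvStep values rows cols tv (r, c)) tv)
      (List.replicate (rows * cols) 0) =
      ((List.range rows).flatMap (fun r => (List.range cols).map (fun c => ((r, c) : ℕ × ℕ)))).foldl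
        (pvStep values rows cols) (List.replicate (rows * cols) 0) := by
    rw [List.foldl_flatMap]
    simp only [List.foldl_map]
  rw [hflat]
  apply List.ext_getElem?
  intro j
  have hlength : (((List.range rows).flatMap
      (fun r => (List.range cols).map (fun c => ((r, c) : ℕ × ℕ)))).foldl
        (pvStep values rows cols) (List.replicate (rows * cols) 0)).length = rows * cols := by
    rw [pvFold_length]; simp
  by_cases hj : j < rows * cols
  · have hrpos : 0 < rows := by
      rcases Nat.eq_zero_or_pos rows with h | h
      · subst h; rw [Nat.zero_mul] at hj; omega
      · exact h
    have hhit := pvFold_hit values rows cols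
      ((List.range rows).flatMap (fun r => (List.range cols).map (fun c => ((r, c) : ℕ × ℕ))))
      (List.replicate (rows * cols) 0) j
      (by
        intro p hp
        rcases List.mem_flatMap.mp hp with ⟨r, hr, hp2⟩
        rcases List.mem_map.mp hp2 with ⟨c, _, hpc⟩
        rw [← hpc]
        exact List.mem_range.mp hr)
      (by simpa using hj)
      (by
        refine ⟨(j % rows, j / rows), ?_, ?_⟩
        · refine List.mem_flatMap.mpr ⟨j % rows, List.mem_range.mpr (Nat.mod_lt j hrpos), ?_⟩
          refine List.mem_map.mpr ⟨j / rows, List.mem_range.mpr ?_, rfl⟩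
          exact (Nat.div_lt_iff_lt_mul hrpos).mpr (by rw [Nat.mul_comm]; exact hj)
        · have h8 := Nat.div_add_mod j rows
          have h9 : (j / rows) * rows = rows * (j / rows) := Nat.mul_comm _ _
          simp only
          omega)
    rw [hhit, List.getElem?_map, List.getElem?_range (by rw [Nat.mul_comm]; exact hj)]
    rfl
  · rw [List.getElem?_eq_none (by rw [hlength]; omega),
        List.getElem?_eq_none (by rw [List.length_map, List.length_range, Nat.mul_comm]; omega)]

-- ===== VERDICT (by name: the statement is the Claim_ definition above) =====
theorem ReadVectorFromYaml_spec : Claim_equal_ReadVectorFromYaml := by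
  intro values framework rows cols _ hpre
  unfold Spec_ReadVectorFromYaml
  rcases hpre with hgym | ⟨hsim, hdeg | ⟨hr, hc, hlen⟩⟩
  · subst hgym; rfl
  · -- cols ≤ 0: both sides return []
    subst hsim
    have hrange : PySem.List.pyRange 0 cols 1 = [] := by
      simp [PySem.List.pyRange]
      omega
    simp only [ReadVectorFromYaml, ReadVectorFromYaml_alt]
    rw [if_pos (show (("isaacsim" : String) == "isaacsim") = true from rfl),
        if_pos (show (("isaacsim" : String) == "isaacsim") = true from rfl),
        hrange]
    simp only [List.foldl_nil, List.foldl_fixed]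
    rw [Int.toNat_of_nonpos hdeg]
    simp
  · subst hsim
    obtain ⟨R, rfl⟩ : ∃ R : ℕ, rows = (R : Int) := ⟨rows.toNat, (Int.toNat_of_nonneg hr).symm⟩
    obtain ⟨C, rfl⟩ : ∃ C : ℕ, cols = (C : Int) := ⟨cols.toNat, (Int.toNat_of_nonneg hc).symm⟩
    have hlen' : values.length = R * C := by exact_mod_cast hlen
    rw [pvA_char values R C hlen', pvB_char values R C hlen']
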